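-- pv_equiv track=rewrite | github.com/PritiKumariGupta/CobolCodeBench-Framework | src/utils/code_extractor.py | swap_sections
-- ===== SOURCE A (Python) =====
-- def swap_sections(src: str) -> str:
--     """
--     Swap the Working Storage and Linkage Sections
--     """
--     working_storage, linkage, procedure, begin = [], [], [], []
--     current_section = begin
--
--     for line in src.split("\n"):
--         stripped_line = line.strip().upper()
--         if stripped_line.startswith("WORKING-STORAGE SECTION."):
--             current_section = working_storage
--         elif stripped_line.startswith("LINKAGE SECTION."):
--             current_section = linkage
--         elif stripped_line.startswith("PROCEDURE DIVISION"):
--             current_section = procedure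
--             line = "       PROCEDURE DIVISION USING LINKED-ITEMS."
--         current_section.append(line)
--
--     return "\n".join(begin + working_storage + linkage + procedure)
-- ===== SOURCE B (Python) =====
-- def swap_sections(src: str) -> str:
--     """
--     Swap the Working Storage and Linkage Sections
--     """
--     # Two staged passes instead of A's single fold with a current-section pointer:
--     # first label every line with the section opened by the nearest preceding
--     # boundary (0=begin, 1=working-storage, 2=linkage, 3=procedure), then build
--     # each bucket by filtering the labelled lines, rewriting procedure headers.
--     REPL = "       PROCEDURE DIVISION USING LINKED-ITEMS."
--
--     def kind(line):
--         s = line.strip().upper()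
--         if s.startswith("WORKING-STORAGE SECTION."):
--             return 1
--         if s.startswith("LINKAGE SECTION."):
--             return 2
--         if s.startswith("PROCEDURE DIVISION"):
--             return 3
--         return 0
--
--     lines = src.split("\n")
--     kinds = [kind(l) for l in lines]
--     labels = []
--     cur = 0
--     for k in kinds:
--         if k != 0:
--             cur = k
--         labels.append(cur)
--     out = [REPL if k == 3 else l for l, k in zip(lines, kinds)]
--
--     def pick(t):
--         return [l for l, lab in zip(out, labels) if lab == t]
--
--     return "\n".join(pick(0) + pick(1) + pick(2) + pick(3))
-- ===== Notes on version B (the rewrite author's own statement) =====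
-- stated objective: alternative
-- what changed: Replaces A's single fold appending into a current-section bucket by two staged passes: first label every line with the section of its nearest preceding boundary and rewrite procedure headers, then build the four output segments by filtering the labelled lines per section.
import Mathlib
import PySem

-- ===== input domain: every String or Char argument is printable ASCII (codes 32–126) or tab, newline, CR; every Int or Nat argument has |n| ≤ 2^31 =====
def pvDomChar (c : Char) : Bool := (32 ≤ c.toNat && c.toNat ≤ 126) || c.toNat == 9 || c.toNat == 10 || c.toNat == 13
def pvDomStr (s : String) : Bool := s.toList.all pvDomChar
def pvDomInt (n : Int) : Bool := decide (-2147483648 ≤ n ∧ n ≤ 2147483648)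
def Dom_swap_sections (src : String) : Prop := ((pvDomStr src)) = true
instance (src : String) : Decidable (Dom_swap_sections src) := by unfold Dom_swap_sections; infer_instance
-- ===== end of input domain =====

-- B swaps the sections by two staged passes (label every line with its section, then
-- filter per section) instead of A's single fold with a current-section pointer
-- (objective: alternative decomposition, same cost).

-- ===== PORT A =====
-- A's loop state: (working_storage, linkage, procedure, begin, current_section as 0/1/2/3)
def swapStepA (st : List String × List String × List String × List String × Nat)
    (line : String) : List String × List String × List String × List String × Nat :=
  let (ws, lk, pr, bg, cur) := st
  -- stripped_line computed inline (Python binds it to a local name)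
  if PySem.Str.startswith (PySem.Str.upper (PySem.Str.strip line)) "WORKING-STORAGE SECTION." then
    (ws ++ [line], lk, pr, bg, 1)
  else if PySem.Str.startswith (PySem.Str.upper (PySem.Str.strip line)) "LINKAGE SECTION." then
    (ws, lk ++ [line], pr, bg, 2)
  else if PySem.Str.startswith (PySem.Str.upper (PySem.Str.strip line)) "PROCEDURE DIVISION" then
    (ws, lk, pr ++ ["       PROCEDURE DIVISION USING LINKED-ITEMS."], bg, 3)
  else
    match cur with
    | 0 => (ws, lk, pr, bg ++ [line], cur)
    | 1 => (ws ++ [line], lk, pr, bg, cur)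
    | 2 => (ws, lk ++ [line], pr, bg, cur)
    | _ => (ws, lk, pr ++ [line], bg, cur)

def swap_sections (src : String) : String :=
  -- src.split("\n"): sep ≠ "" so split? is always `some`
  let lines := (PySem.Str.split? src "\n").getD []
  let r := lines.foldl swapStepA ([], [], [], [], 0)
  PySem.Str.join "\n" (r.2.2.2.1 ++ r.1 ++ r.2.1 ++ r.2.2.1)

-- ===== PORT B =====
-- kind of a line: 0 ordinary, 1/2/3 the three boundary headers (Source B's `kind`)
def kindB (line : String) : Nat :=
  if PySem.Str.startswith (PySem.Str.upper (PySem.Str.strip line)) "WORKING-STORAGE SECTION." then 1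
  else if PySem.Str.startswith (PySem.Str.upper (PySem.Str.strip line)) "LINKAGE SECTION." then 2
  else if PySem.Str.startswith (PySem.Str.upper (PySem.Str.strip line)) "PROCEDURE DIVISION" then 3
  else 0

-- Source B's label scan: each line gets the kind of the nearest preceding boundary
-- (cur propagated while the kind is 0)
def labelsB (cur : Nat) : List Nat → List Nat
  | [] => []
  | k :: rest => let c := if k = 0 then cur else k; c :: labelsB c rest

def swap_sections_alt (src : String) : String :=
  let lines := (PySem.Str.split? src "\n").getD []
  let kinds := lines.map kindB
  let labels := labelsB 0 kinds
  let out := (lines.zip kinds).map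
    (fun p => if p.2 = 3 then "       PROCEDURE DIVISION USING LINKED-ITEMS." else p.1)
  let pick := fun (t : Nat) => ((out.zip labels).filter (fun p => p.2 = t)).map Prod.fst
  PySem.Str.join "\n" (pick 0 ++ pick 1 ++ pick 2 ++ pick 3)

-- ===== PRECONDITION & SPEC =====
def Spec_swap_sections (src : String) (out : String) : Prop := out = swap_sections_alt src
instance (src : String) (out : String) : Decidable (Spec_swap_sections src out) := by unfold Spec_swap_sections; infer_instance

-- ===== CLAIM (what is proved, stated in full; the proofs are below) =====
def Claim_equal_swap_sections : Prop := ∀ (src : String), Dom_swap_sections src → Spec_swap_sections src (swap_sections src)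

-- ===== LEMMAS AND PROOFS =====

-- B's picked segment for section t, generalized to an arbitrary starting label c
def pickSeg (t c : Nat) (lines : List String) : List String :=
  let kinds := lines.map kindB
  let out := (lines.zip kinds).map
    (fun p => if p.2 = 3 then "       PROCEDURE DIVISION USING LINKED-ITEMS." else p.1)
  ((out.zip (labelsB c kinds)).filter (fun p => p.2 = t)).map Prod.fst

theorem pickSeg_nil (t c : Nat) : pickSeg t c [] = [] := rfl

theorem pickSeg_cons (t c : Nat) (l : String) (rest : List String) :
    pickSeg t c (l :: rest) =
      (let k := kindB l
       let c' := if k = 0 then c else k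
       (if c' = t then [if k = 3 then "       PROCEDURE DIVISION USING LINKED-ITEMS." else l] else [])
         ++ pickSeg t c' rest) := by
  obtain ⟨k, hk⟩ : ∃ k, kindB l = k := ⟨_, rfl⟩
  simp only [pickSeg, List.map_cons, hk]
  simp only [List.zip_cons_cons, labelsB, List.filter_cons, List.map_cons]
  by_cases h1 : (if k = 0 then c else k) = t <;> simp [h1]

-- kindB's value under the three boundary tests
theorem kindB_w {l : String}
    (hw : PySem.Str.startswith (PySem.Str.upper (PySem.Str.strip l)) "WORKING-STORAGE SECTION." = true) :
    kindB l = 1 := by unfold kindB; rw [hw]; rfl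

theorem kindB_l {l : String}
    (hw : PySem.Str.startswith (PySem.Str.upper (PySem.Str.strip l)) "WORKING-STORAGE SECTION." = false)
    (hl : PySem.Str.startswith (PySem.Str.upper (PySem.Str.strip l)) "LINKAGE SECTION." = true) :
    kindB l = 2 := by unfold kindB; rw [hw, hl]; rfl

theorem kindB_p {l : String}
    (hw : PySem.Str.startswith (PySem.Str.upper (PySem.Str.strip l)) "WORKING-STORAGE SECTION." = false)
    (hl : PySem.Str.startswith (PySem.Str.upper (PySem.Str.strip l)) "LINKAGE SECTION." = false)
    (hp : PySem.Str.startswith (PySem.Str.upper (PySem.Str.strip l)) "PROCEDURE DIVISION" = true) :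
    kindB l = 3 := by unfold kindB; rw [hw, hl, hp]; rfl

theorem kindB_n {l : String}
    (hw : PySem.Str.startswith (PySem.Str.upper (PySem.Str.strip l)) "WORKING-STORAGE SECTION." = false)
    (hl : PySem.Str.startswith (PySem.Str.upper (PySem.Str.strip l)) "LINKAGE SECTION." = false)
    (hp : PySem.Str.startswith (PySem.Str.upper (PySem.Str.strip l)) "PROCEDURE DIVISION" = false) :
    kindB l = 0 := by unfold kindB; rw [hw, hl, hp]; rfl

-- A's step under the three boundary tests
theorem stepA_w {l : String}
    (hw : PySem.Str.startswith (PySem.Str.upper (PySem.Str.strip l)) "WORKING-STORAGE SECTION." = true)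
    (ws lk pr bg : List String) (c : Nat) :
    swapStepA (ws, lk, pr, bg, c) l = (ws ++ [l], lk, pr, bg, 1) := by
  unfold swapStepA; rw [hw]; simp

theorem stepA_l {l : String}
    (hw : PySem.Str.startswith (PySem.Str.upper (PySem.Str.strip l)) "WORKING-STORAGE SECTION." = false)
    (hl : PySem.Str.startswith (PySem.Str.upper (PySem.Str.strip l)) "LINKAGE SECTION." = true)
    (ws lk pr bg : List String) (c : Nat) :
    swapStepA (ws, lk, pr, bg, c) l = (ws, lk ++ [l], pr, bg, 2) := by
  unfold swapStepA; rw [hw, hl]; simp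

theorem stepA_p {l : String}
    (hw : PySem.Str.startswith (PySem.Str.upper (PySem.Str.strip l)) "WORKING-STORAGE SECTION." = false)
    (hl : PySem.Str.startswith (PySem.Str.upper (PySem.Str.strip l)) "LINKAGE SECTION." = false)
    (hp : PySem.Str.startswith (PySem.Str.upper (PySem.Str.strip l)) "PROCEDURE DIVISION" = true)
    (ws lk pr bg : List String) (c : Nat) :
    swapStepA (ws, lk, pr, bg, c) l =
      (ws, lk, pr ++ ["       PROCEDURE DIVISION USING LINKED-ITEMS."], bg, 3) := by
  unfold swapStepA; rw [hw, hl, hp]; simp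

theorem stepA_n0 {l : String}
    (hw : PySem.Str.startswith (PySem.Str.upper (PySem.Str.strip l)) "WORKING-STORAGE SECTION." = false)
    (hl : PySem.Str.startswith (PySem.Str.upper (PySem.Str.strip l)) "LINKAGE SECTION." = false)
    (hp : PySem.Str.startswith (PySem.Str.upper (PySem.Str.strip l)) "PROCEDURE DIVISION" = false)
    (ws lk pr bg : List String) :
    swapStepA (ws, lk, pr, bg, 0) l = (ws, lk, pr, bg ++ [l], 0) := by
  unfold swapStepA; rw [hw, hl, hp]; simp

theorem stepA_n1 {l : String}
    (hw : PySem.Str.startswith (PySem.Str.upper (PySem.Str.strip l)) "WORKING-STORAGE SECTION." = false)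
    (hl : PySem.Str.startswith (PySem.Str.upper (PySem.Str.strip l)) "LINKAGE SECTION." = false)
    (hp : PySem.Str.startswith (PySem.Str.upper (PySem.Str.strip l)) "PROCEDURE DIVISION" = false)
    (ws lk pr bg : List String) :
    swapStepA (ws, lk, pr, bg, 1) l = (ws ++ [l], lk, pr, bg, 1) := by
  unfold swapStepA; rw [hw, hl, hp]; simp

theorem stepA_n2 {l : String}
    (hw : PySem.Str.startswith (PySem.Str.upper (PySem.Str.strip l)) "WORKING-STORAGE SECTION." = false)
    (hl : PySem.Str.startswith (PySem.Str.upper (PySem.Str.strip l)) "LINKAGE SECTION." = false)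
    (hp : PySem.Str.startswith (PySem.Str.upper (PySem.Str.strip l)) "PROCEDURE DIVISION" = false)
    (ws lk pr bg : List String) :
    swapStepA (ws, lk, pr, bg, 2) l = (ws, lk ++ [l], pr, bg, 2) := by
  unfold swapStepA; rw [hw, hl, hp]; simp

theorem stepA_n3 {l : String}
    (hw : PySem.Str.startswith (PySem.Str.upper (PySem.Str.strip l)) "WORKING-STORAGE SECTION." = false)
    (hl : PySem.Str.startswith (PySem.Str.upper (PySem.Str.strip l)) "LINKAGE SECTION." = false)
    (hp : PySem.Str.startswith (PySem.Str.upper (PySem.Str.strip l)) "PROCEDURE DIVISION" = false)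
    (ws lk pr bg : List String) :
    swapStepA (ws, lk, pr, bg, 3) l = (ws, lk, pr ++ [l], bg, 3) := by
  unfold swapStepA; rw [hw, hl, hp]; simp

-- the key invariant: A's fold from state (ws,lk,pr,bg,c), c ≤ 3, produces B's segments
theorem swap_key (lines : List String) :
    ∀ (ws lk pr bg : List String) (c : Nat), c ≤ 3 → ∃ c',
      lines.foldl swapStepA (ws, lk, pr, bg, c) =
        (ws ++ pickSeg 1 c lines, lk ++ pickSeg 2 c lines,
         pr ++ pickSeg 3 c lines, bg ++ pickSeg 0 c lines, c') := by
  induction lines with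
  | nil => intro ws lk pr bg c _; exact ⟨c, by simp [pickSeg_nil]⟩
  | cons l rest ih =>
    intro ws lk pr bg c hc
    simp only [List.foldl_cons]
    rw [pickSeg_cons 0, pickSeg_cons 1, pickSeg_cons 2, pickSeg_cons 3]
    rcases hw : PySem.Str.startswith (PySem.Str.upper (PySem.Str.strip l)) "WORKING-STORAGE SECTION." with _ | _
    case false =>
      rcases hl : PySem.Str.startswith (PySem.Str.upper (PySem.Str.strip l)) "LINKAGE SECTION." with _ | _
      case false =>
        rcases hp : PySem.Str.startswith (PySem.Str.upper (PySem.Str.strip l)) "PROCEDURE DIVISION" with _ | _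
        case false =>
          -- ordinary line: stays in section c
          rw [kindB_n hw hl hp]
          interval_cases c
          · rw [stepA_n0 hw hl hp]
            obtain ⟨c', h⟩ := ih ws lk pr (bg ++ [l]) 0 (by omega)
            exact ⟨c', by rw [h]; simp⟩
          · rw [stepA_n1 hw hl hp]
            obtain ⟨c', h⟩ := ih (ws ++ [l]) lk pr bg 1 (by omega)
            exact ⟨c', by rw [h]; simp⟩
          · rw [stepA_n2 hw hl hp]
            obtain ⟨c', h⟩ := ih ws (lk ++ [l]) pr bg 2 (by omega)
            exact ⟨c', by rw [h]; simp⟩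
          · rw [stepA_n3 hw hl hp]
            obtain ⟨c', h⟩ := ih ws lk (pr ++ [l]) bg 3 (by omega)
            exact ⟨c', by rw [h]; simp⟩
        case true =>
          rw [kindB_p hw hl hp, stepA_p hw hl hp]
          obtain ⟨c', h⟩ := ih ws lk
            (pr ++ ["       PROCEDURE DIVISION USING LINKED-ITEMS."]) bg 3 (by omega)
          exact ⟨c', by rw [h]; simp⟩
      case true =>
        rw [kindB_l hw hl, stepA_l hw hl]
        obtain ⟨c', h⟩ := ih ws (lk ++ [l]) pr bg 2 (by omega)
        exact ⟨c', by rw [h]; simp⟩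
    case true =>
      rw [kindB_w hw, stepA_w hw]
      obtain ⟨c', h⟩ := ih (ws ++ [l]) lk pr bg 1 (by omega)
      exact ⟨c', by rw [h]; simp⟩

-- B's result, written with pickSeg (definitional: pickSeg 't 0 lines' is alt's 'pick t')
theorem alt_eq (src : String) :
    swap_sections_alt src =
      (let lines := (PySem.Str.split? src "\n").getD []
       PySem.Str.join "\n"
         (pickSeg 0 0 lines ++ pickSeg 1 0 lines ++ pickSeg 2 0 lines ++ pickSeg 3 0 lines)) := rfl

-- ===== VERDICT (by name: the statement is the Claim_ definition above) =====
theorem swap_sections_spec : Claim_equal_swap_sections := by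
  intro src _
  unfold Spec_swap_sections
  rw [alt_eq]
  unfold swap_sections
  obtain ⟨c', hc⟩ := swap_key ((PySem.Str.split? src "\n").getD []) [] [] [] [] 0 (by omega)
  simp only [hc, List.nil_append]
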